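-- pv_equiv track=rewrite | github.com/AzyzHm/CodeForces-Problems- | python/Array with Odd Sum.py | two_parity
-- ===== SOURCE A (Python) =====
-- def two_parity(a,n)->bool:
--     even_exist = False
--     odd_exist = False
--     for i in range(n):
--         if a[i] % 2 == 0:
--             even_exist = True
--         else:
--             odd_exist = True
--     if even_exist and odd_exist:
--         return True
--     else:
--         return False
-- ===== SOURCE B (Python) =====
-- def two_parity(a, n) -> bool:
--     return any(a[i] % 2 == 0 for i in range(n)) and any(a[i] % 2 == 1 for i in range(n))
-- ===== Notes on version B (the rewrite author's own statement) =====
-- stated objective: idiomatic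
-- what changed: Replaced the single fused loop maintaining two boolean flags with two independent short-circuiting any() scans (one for an even element, one for an odd element).
import Mathlib
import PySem

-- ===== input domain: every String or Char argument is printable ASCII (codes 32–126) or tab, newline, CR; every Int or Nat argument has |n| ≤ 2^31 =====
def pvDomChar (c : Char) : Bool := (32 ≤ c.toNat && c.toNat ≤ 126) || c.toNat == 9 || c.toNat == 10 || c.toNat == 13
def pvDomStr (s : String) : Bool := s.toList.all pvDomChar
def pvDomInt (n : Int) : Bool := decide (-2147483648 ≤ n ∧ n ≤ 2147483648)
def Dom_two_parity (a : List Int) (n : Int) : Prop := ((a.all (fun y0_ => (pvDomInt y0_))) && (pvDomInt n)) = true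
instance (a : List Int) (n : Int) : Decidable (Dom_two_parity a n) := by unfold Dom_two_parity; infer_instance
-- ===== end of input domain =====

-- B replaces A's fused flag-maintaining loop with two independent short-circuiting `any` scans (idiomatic; return-value equivalence).

-- ===== PORT A =====
def two_parity (a : List Int) (n : Int) : Bool :=
  let st := (PySem.List.pyRange 0 n 1).foldl
    (fun (s : Bool × Bool) i =>
      if PySem.Int.mod (PySem.List.pyGetD a i 0) 2 == 0 then (true, s.2) else (s.1, true))
    (false, false)
  if st.1 && st.2 then true else false

-- ===== PORT B =====
def two_parity_alt (a : List Int) (n : Int) : Bool :=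
  ((PySem.List.pyRange 0 n 1).any (fun i => PySem.Int.mod (PySem.List.pyGetD a i 0) 2 == 0)) &&
  ((PySem.List.pyRange 0 n 1).any (fun i => PySem.Int.mod (PySem.List.pyGetD a i 0) 2 == 1))

-- ===== PRECONDITION & SPEC =====
-- Pre_ excludes exactly the inputs where a[i] raises IndexError in A: n exceeding the list length.
def Pre_two_parity (a : List Int) (n : Int) : Prop := n ≤ (a.length : Int)
instance (a : List Int) (n : Int) : Decidable (Pre_two_parity a n) := by unfold Pre_two_parity; infer_instance
def pvWitness_two_parity : List Int × Int := ([1, 2, 3], 3)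

def Spec_two_parity (a : List Int) (n : Int) (out : Bool) : Prop := out = two_parity_alt a n
instance (a : List Int) (n : Int) (out : Bool) : Decidable (Spec_two_parity a n out) := by unfold Spec_two_parity; infer_instance

-- ===== CLAIM (what is proved, stated in full; the proofs are below) =====
def Claim_equal_two_parity : Prop := ∀ (a : List Int) (n : Int), Dom_two_parity a n → Pre_two_parity a n → Spec_two_parity a n (two_parity a n)

-- ===== LEMMAS AND PROOFS =====

theorem foldl_flags (p : Int → Bool) (l : List Int) (e o : Bool) :
    l.foldl (fun (s : Bool × Bool) i => if p i then (true, s.2) else (s.1, true)) (e, o)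
      = (e || l.any p, o || l.any (fun i => !p i)) := by
  induction l generalizing e o with
  | nil => simp
  | cons x xs ih => by_cases h : p x <;> simp [h, ih]

theorem odd_pred (x : Int) : (PySem.Int.mod x 2 == 1) = !(PySem.Int.mod x 2 == 0) := by
  rcases PySem.Int.mod_two_eq x with h | h <;> rw [h] <;> rfl

-- ===== VERDICT (by name: the statement is the Claim_ definition above) =====
theorem two_parity_spec : Claim_equal_two_parity := by
  intro a n _ _
  unfold Spec_two_parity two_parity two_parity_alt
  rw [foldl_flags]
  simp only [Bool.false_or]
  have : (fun i => PySem.Int.mod (PySem.List.pyGetD a i 0) 2 == 1)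
       = (fun i => !(PySem.Int.mod (PySem.List.pyGetD a i 0) 2 == 0)) := by
    funext i; exact odd_pred _
  rw [this]
  cases (PySem.List.pyRange 0 n 1).any (fun i => PySem.Int.mod (PySem.List.pyGetD a i 0) 2 == 0) <;>
    cases (PySem.List.pyRange 0 n 1).any (fun i => !(PySem.Int.mod (PySem.List.pyGetD a i 0) 2 == 0)) <;> rfl
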